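-- pv_equiv track=rewrite | github.com/SandraLouise/SVJedi-graph | filter_aln_v4.py | find_sv_allele
-- ===== SOURCE A (Python) =====
-- def find_sv_allele(aln_path, sv_graphInfo_dict):
--     """
--     Find SV from path in dict of SV breakpt edges
--     """
--     target_sv_allele = set()
--     for sv in sv_graphInfo_dict.keys(): #{sv : [[ref breakpt edges], [alt breakpt edges], [first and last nodes of region graph]]}
--
--         for ref_breakpt_edge in sv_graphInfo_dict[sv][0]:
--             if ref_breakpt_edge in aln_path:
--                 target_sv_allele.add((sv, 0))
--
--         for alt_breakpt_edge in sv_graphInfo_dict[sv][1]: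
--             if alt_breakpt_edge in aln_path:
--                 target_sv_allele.add((sv, 1))
--
--         if ((sv, 0) in target_sv_allele) and ((sv, 1) in target_sv_allele): #ambiguous aln on sv
--             target_sv_allele.remove((sv, 0))
--             target_sv_allele.remove((sv, 1))
--
--     return list(target_sv_allele)
-- ===== SOURCE B (Python) =====
-- def find_sv_allele(aln_path, sv_graphInfo_dict):
--     # Invert the traversal: index every breakpoint edge once, then one pass over aln_path.
--     index = {}
--     for sv, info in sv_graphInfo_dict.items():
--         for edge in info[0]:
--             index.setdefault(edge, []).append((sv, 0))
--         for edge in info[1]: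
--             index.setdefault(edge, []).append((sv, 1))
--     hits = set()
--     for step in aln_path:
--         hits.update(index.get(step, ()))
--     result = []
--     for sv in sv_graphInfo_dict:
--         ref_hit = (sv, 0) in hits
--         alt_hit = (sv, 1) in hits
--         if ref_hit != alt_hit:
--             result.append((sv, 0) if ref_hit else (sv, 1))
--     return result
-- ===== Notes on version B (the rewrite author's own statement) =====
-- stated objective: faster
-- what changed: Instead of scanning aln_path once per breakpoint edge of every SV, B builds an edge->[(sv,allele)] index once, collects hits in a single pass over aln_path, and then emits per SV the XOR of ref/alt hits.
import Mathlib
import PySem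

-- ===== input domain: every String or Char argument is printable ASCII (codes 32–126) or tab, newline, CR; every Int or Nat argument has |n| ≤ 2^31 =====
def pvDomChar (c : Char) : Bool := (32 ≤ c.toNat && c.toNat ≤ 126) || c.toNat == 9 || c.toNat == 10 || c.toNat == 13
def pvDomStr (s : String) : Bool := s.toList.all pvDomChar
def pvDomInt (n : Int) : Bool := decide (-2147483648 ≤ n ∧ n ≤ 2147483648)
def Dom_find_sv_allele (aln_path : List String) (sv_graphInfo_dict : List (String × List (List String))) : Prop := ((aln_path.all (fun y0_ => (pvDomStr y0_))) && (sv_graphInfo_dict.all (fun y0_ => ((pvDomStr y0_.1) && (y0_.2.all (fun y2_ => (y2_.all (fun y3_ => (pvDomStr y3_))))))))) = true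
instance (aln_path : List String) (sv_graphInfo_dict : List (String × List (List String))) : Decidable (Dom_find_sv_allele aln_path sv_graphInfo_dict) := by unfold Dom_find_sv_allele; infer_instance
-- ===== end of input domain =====

-- B replaces A's per-SV repeated scans of aln_path by an edge->(sv,allele) index built once
-- and a single indexed pass over aln_path (faster); A returns list(set) — the ports return the
-- set's elements in insertion order, and B's port is proved to produce exactly that list.

-- ===== PORT A =====
def find_sv_allele (aln_path : List String) (sv_graphInfo_dict : List (String × List (List String))) : List (String × Int) :=
  let d := PySem.Dict.ofList sv_graphInfo_dict
  (PySem.Dict.keys d).foldl (fun tset sv =>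
      let info := d.getD sv []
      let t1 := (PySem.List.pyGetD info 0 []).foldl
        (fun s e => if aln_path.contains e then PySem.Set.add s (sv, (0 : Int)) else s) tset
      let t2 := (PySem.List.pyGetD info 1 []).foldl
        (fun s e => if aln_path.contains e then PySem.Set.add s (sv, (1 : Int)) else s) t1
      if t2.contains (sv, (0 : Int)) && t2.contains (sv, (1 : Int)) then
        PySem.Set.discard (PySem.Set.discard t2 (sv, (0 : Int))) (sv, (1 : Int))
      else t2)
    PySem.Set.empty

-- ===== PORT B =====
def find_sv_allele_alt (aln_path : List String) (sv_graphInfo_dict : List (String × List (List String))) : List (String × Int) :=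
  let d := PySem.Dict.ofList sv_graphInfo_dict
  let index := d.items.foldl (fun ix p =>
      let ix1 := (PySem.List.pyGetD p.2 0 []).foldl
        (fun ix e => ix.modify e [] (· ++ [(p.1, (0 : Int))])) ix
      (PySem.List.pyGetD p.2 1 []).foldl
        (fun ix e => ix.modify e [] (· ++ [(p.1, (1 : Int))])) ix1)
    PySem.Dict.empty
  let hits := aln_path.foldl (fun s step => PySem.Set.update s (index.getD step [])) PySem.Set.empty
  (PySem.Dict.keys d).foldl (fun res sv =>
      let r := hits.contains (sv, (0 : Int))
      let a := hits.contains (sv, (1 : Int))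
      if r != a then res ++ [if r then (sv, (0 : Int)) else (sv, (1 : Int))] else res)
    []

-- ===== PRECONDITION & SPEC =====
-- Pre_ excludes exactly the inputs where some SV's info list has fewer than two allele-edge
-- lists, on which Python A raises IndexError at info[0]/info[1] (dict semantics: last value
-- per key is the effective one).
def Pre_find_sv_allele (aln_path : List String) (sv_graphInfo_dict : List (String × List (List String))) : Prop :=
  ∀ p ∈ (PySem.Dict.ofList sv_graphInfo_dict).items, 2 ≤ p.2.length
instance (aln_path : List String) (sv_graphInfo_dict : List (String × List (List String))) : Decidable (Pre_find_sv_allele aln_path sv_graphInfo_dict) := by unfold Pre_find_sv_allele; infer_instance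
def pvWitness_find_sv_allele : List String × (List (String × List (List String))) :=
  (["e1", "e3"], [("sv1", [["e1"], ["e2"]]), ("sv2", [["e3"], ["e4"]])])

def Spec_find_sv_allele (aln_path : List String) (sv_graphInfo_dict : List (String × List (List String))) (out : List (String × Int)) : Prop := out = find_sv_allele_alt aln_path sv_graphInfo_dict
instance (aln_path : List String) (sv_graphInfo_dict : List (String × List (List String))) (out : List (String × Int)) : Decidable (Spec_find_sv_allele aln_path sv_graphInfo_dict out) := by unfold Spec_find_sv_allele; infer_instance

-- ===== CLAIM (what is proved, stated in full; the proofs are below) =====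
def Claim_equal_find_sv_allele : Prop := ∀ (aln_path : List String) (sv_graphInfo_dict : List (String × List (List String))), Dom_find_sv_allele aln_path sv_graphInfo_dict → Pre_find_sv_allele aln_path sv_graphInfo_dict → Spec_find_sv_allele aln_path sv_graphInfo_dict (find_sv_allele aln_path sv_graphInfo_dict)

-- ===== LEMMAS AND PROOFS =====

-- shared characterisation: did any edge of this list occur on the alignment path?
def pvHit (path es : List String) : Bool := es.any (fun e => path.contains e)
def pvEdges (d : PySem.Dict String (List (List String))) (sv : String) (i : Int) : List String :=
  PySem.List.pyGetD (d.getD sv []) i []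
def pvContrib (path : List String) (d : PySem.Dict String (List (List String))) (sv : String) :
    List (String × Int) :=
  if (pvHit path (pvEdges d sv 0) != pvHit path (pvEdges d sv 1))
  then [if pvHit path (pvEdges d sv 0) then (sv, (0 : Int)) else (sv, (1 : Int))] else []
def pvPairs (d : PySem.Dict String (List (List String))) : List (String × (String × Int)) :=
  d.items.flatMap (fun q =>
    (PySem.List.pyGetD q.2 0 []).map (fun e => (e, (q.1, (0 : Int)))) ++
    (PySem.List.pyGetD q.2 1 []).map (fun e => (e, (q.1, (1 : Int)))))
def pvIndex (d : PySem.Dict String (List (List String))) : PySem.Dict String (List (String × Int)) :=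
  (pvPairs d).foldl (fun ix q => ix.modify q.1 [] (· ++ [q.2])) PySem.Dict.empty

-- ---- A side ----

theorem pvA_skip (path : List String) (x : String × Int) (es : List String) :
    ∀ (s : PySem.Set (String × Int)), x ∈ s →
      es.foldl (fun s e => if path.contains e then PySem.Set.add s x else s) s = s := by
  induction es with
  | nil => intro s _; rfl
  | cons e es ih =>
      intro s hx
      by_cases h : path.contains e = true
      · simp only [List.foldl_cons, h, if_pos, PySem.Set.add_of_mem hx]
        exact ih s hx
      · simp only [List.foldl_cons, if_neg h]
        exact ih s hx

theorem pvA_run (path : List String) (x : String × Int) (es : List String) :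
    ∀ (s : PySem.Set (String × Int)), x ∉ s →
      es.foldl (fun s e => if path.contains e then PySem.Set.add s x else s) s
        = s ++ (if pvHit path es then [x] else []) := by
  induction es with
  | nil => intro s _; simp [pvHit]
  | cons e es ih =>
      intro s hx
      by_cases h : path.contains e = true
      · have he : e ∈ path := by simpa using h
        have hhit : pvHit path (e :: es) = true := by simp [pvHit, List.any_cons, he]
        rw [List.foldl_cons, if_pos h, PySem.Set.add_of_not_mem hx,
          pvA_skip path x es _ (by simp), hhit]
        simp
      · have he : e ∉ path := by simpa using h
        have hhit : pvHit path (e :: es) = pvHit path es := by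
          simp [pvHit, List.any_cons, he]
        rw [List.foldl_cons, if_neg h, ih s hx, hhit]

theorem pvDiscard_not_mem {s : PySem.Set (String × Int)} {x : String × Int} (h : x ∉ s) :
    PySem.Set.discard s x = s := by
  simp only [PySem.Set.discard]
  apply List.filter_eq_self.mpr
  intro y hy
  have hne : y ≠ x := fun hxy => h (hxy ▸ hy)
  simp [hne]

theorem pvDiscard_append (s t : PySem.Set (String × Int)) (x : String × Int) :
    PySem.Set.discard (s ++ t) x = PySem.Set.discard s x ++ PySem.Set.discard t x := by
  simp [PySem.Set.discard, List.filter_append]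

theorem pvContrib_fst (path : List String) (d : PySem.Dict String (List (List String)))
    (sv : String) (p : String × Int) (hp : p ∈ pvContrib path d sv) : p.1 = sv := by
  unfold pvContrib at hp
  split at hp <;> simp at hp
  split at hp <;> simp [hp]

theorem pvA_step (path : List String) (d : PySem.Dict String (List (List String)))
    (sv : String) (s : PySem.Set (String × Int))
    (h0 : (sv, (0 : Int)) ∉ s) (h1 : (sv, (1 : Int)) ∉ s) :
    (if ((PySem.List.pyGetD (d.getD sv []) 1 []).foldl
          (fun s e => if path.contains e then PySem.Set.add s (sv, (1 : Int)) else s)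
          ((PySem.List.pyGetD (d.getD sv []) 0 []).foldl
            (fun s e => if path.contains e then PySem.Set.add s (sv, (0 : Int)) else s) s)).contains
            (sv, (0 : Int))
        && ((PySem.List.pyGetD (d.getD sv []) 1 []).foldl
          (fun s e => if path.contains e then PySem.Set.add s (sv, (1 : Int)) else s)
          ((PySem.List.pyGetD (d.getD sv []) 0 []).foldl
            (fun s e => if path.contains e then PySem.Set.add s (sv, (0 : Int)) else s) s)).contains
            (sv, (1 : Int)) then
      PySem.Set.discard (PySem.Set.discard
        ((PySem.List.pyGetD (d.getD sv []) 1 []).foldl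
          (fun s e => if path.contains e then PySem.Set.add s (sv, (1 : Int)) else s)
          ((PySem.List.pyGetD (d.getD sv []) 0 []).foldl
            (fun s e => if path.contains e then PySem.Set.add s (sv, (0 : Int)) else s) s))
        (sv, (0 : Int))) (sv, (1 : Int))
    else
      ((PySem.List.pyGetD (d.getD sv []) 1 []).foldl
        (fun s e => if path.contains e then PySem.Set.add s (sv, (1 : Int)) else s)
        ((PySem.List.pyGetD (d.getD sv []) 0 []).foldl
          (fun s e => if path.contains e then PySem.Set.add s (sv, (0 : Int)) else s) s)))
    = s ++ pvContrib path d sv := by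
  have e0 : (PySem.List.pyGetD (d.getD sv []) 0 []).foldl
      (fun s e => if path.contains e then PySem.Set.add s (sv, (0 : Int)) else s) s
      = s ++ (if pvHit path (pvEdges d sv 0) then [(sv, (0 : Int))] else []) :=
    pvA_run path _ _ s h0
  have h1' : (sv, (1 : Int)) ∉ s ++ (if pvHit path (pvEdges d sv 0) then [(sv, (0 : Int))] else []) := by
    intro hmem
    rcases List.mem_append.mp hmem with h | h
    · exact h1 h
    · split at h <;> simp_all
  have e1 : (PySem.List.pyGetD (d.getD sv []) 1 []).foldl
      (fun s e => if path.contains e then PySem.Set.add s (sv, (1 : Int)) else s)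
      (s ++ (if pvHit path (pvEdges d sv 0) then [(sv, (0 : Int))] else []))
      = s ++ (if pvHit path (pvEdges d sv 0) then [(sv, (0 : Int))] else [])
          ++ (if pvHit path (pvEdges d sv 1) then [(sv, (1 : Int))] else []) :=
    pvA_run path _ _ _ h1'
  rw [e0, e1]
  rcases hr : pvHit path (pvEdges d sv 0) <;> rcases ha : pvHit path (pvEdges d sv 1)
  · -- r = false, a = false
    simp [hr, ha, pvContrib, h0]
  · -- r = false, a = true
    simp [hr, ha, pvContrib, h0]
  · -- r = true, a = false
    simp [hr, ha, pvContrib, h1]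
  · -- r = true, a = true : both present, both removed
    have hgoal : PySem.Set.discard (PySem.Set.discard
        (s ++ [(sv, (0 : Int)), (sv, (1 : Int))]) (sv, (0 : Int))) (sv, (1 : Int)) = s := by
      rw [pvDiscard_append, pvDiscard_not_mem h0]
      have d0 : PySem.Set.discard [(sv, (0 : Int)), (sv, (1 : Int))] (sv, (0 : Int))
          = [(sv, (1 : Int))] := by simp [PySem.Set.discard]
      rw [d0, pvDiscard_append, pvDiscard_not_mem h1]
      have d1 : PySem.Set.discard [(sv, (1 : Int))] (sv, (1 : Int)) = [] := by
        simp [PySem.Set.discard]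
      rw [d1, List.append_nil]
    simp [hr, ha, pvContrib, hgoal]

theorem pvA_fold (path : List String) (d : PySem.Dict String (List (List String))) :
    ∀ (keys : List String) (s : PySem.Set (String × Int)), keys.Nodup →
      (∀ sv ∈ keys, ∀ al : Int, (sv, al) ∉ s) →
      keys.foldl (fun tset sv =>
        let info := d.getD sv []
        let t1 := (PySem.List.pyGetD info 0 []).foldl
          (fun s e => if path.contains e then PySem.Set.add s (sv, (0 : Int)) else s) tset
        let t2 := (PySem.List.pyGetD info 1 []).foldl
          (fun s e => if path.contains e then PySem.Set.add s (sv, (1 : Int)) else s) t1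
        if t2.contains (sv, (0 : Int)) && t2.contains (sv, (1 : Int)) then
          PySem.Set.discard (PySem.Set.discard t2 (sv, (0 : Int))) (sv, (1 : Int))
        else t2) s
      = s ++ keys.flatMap (pvContrib path d) := by
  intro keys
  induction keys with
  | nil => intro s _ _; simp
  | cons sv keys ih =>
      intro s hnd hfresh
      have h0 : (sv, (0 : Int)) ∉ s := hfresh sv (by simp) 0
      have h1 : (sv, (1 : Int)) ∉ s := hfresh sv (by simp) 1
      simp only [List.foldl_cons]
      rw [pvA_step path d sv s h0 h1]
      rw [ih (s ++ pvContrib path d sv) (List.Nodup.of_cons hnd) ?_]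
      · simp [List.flatMap_cons]
      · intro sv' hsv' al hmem
        rcases List.mem_append.mp hmem with h | h
        · exact hfresh sv' (by simp [hsv']) al h
        · have heq : sv' = sv := pvContrib_fst path d sv _ h
          subst heq
          exact (List.nodup_cons.mp hnd).1 hsv'

-- ---- B side ----

theorem pvB_index_gen (l : List (String × List (List String))) :
    ∀ (ix : PySem.Dict String (List (String × Int))),
      l.foldl (fun ix p =>
        (PySem.List.pyGetD p.2 1 []).foldl
          (fun ix e => ix.modify e [] (· ++ [(p.1, (1 : Int))]))
          ((PySem.List.pyGetD p.2 0 []).foldl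
            (fun ix e => ix.modify e [] (· ++ [(p.1, (0 : Int))])) ix)) ix
      = (l.flatMap (fun q =>
          (PySem.List.pyGetD q.2 0 []).map (fun e => (e, (q.1, (0 : Int)))) ++
          (PySem.List.pyGetD q.2 1 []).map (fun e => (e, (q.1, (1 : Int)))))).foldl
        (fun ix q => ix.modify q.1 [] (· ++ [q.2])) ix := by
  induction l with
  | nil => intro ix; rfl
  | cons p l ih =>
      intro ix
      simp only [List.foldl_cons, List.flatMap_cons, List.foldl_append, List.foldl_map]
      rw [ih]

theorem pvB_getD (d : PySem.Dict String (List (List String))) (e : String) :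
    (pvIndex d).getD e [] = ((pvPairs d).filter (fun q => q.1 == e)).map (·.2) := by
  unfold pvIndex
  rw [PySem.Dict.getD_foldl_modify_append]
  simp

theorem pvB_hits_mem (d : PySem.Dict String (List (List String))) :
    ∀ (l : List String) (s : PySem.Set (String × Int)) (p : String × Int),
      p ∈ l.foldl (fun s step => PySem.Set.update s ((pvIndex d).getD step [])) s
        ↔ p ∈ s ∨ ∃ st ∈ l, p ∈ (pvIndex d).getD st [] := by
  intro l
  induction l with
  | nil => simp
  | cons st l ih =>
      intro s p
      simp only [List.foldl_cons, ih, PySem.Set.mem_update, List.mem_cons]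
      constructor
      · rintro ((h | h) | ⟨st', h1, h2⟩)
        · exact Or.inl h
        · exact Or.inr ⟨st, Or.inl rfl, h⟩
        · exact Or.inr ⟨st', Or.inr h1, h2⟩
      · rintro (h | ⟨st', (rfl | h1), h2⟩)
        · exact Or.inl (Or.inl h)
        · exact Or.inl (Or.inr h2)
        · exact Or.inr ⟨st', h1, h2⟩

theorem pvB_pair_mem (d : PySem.Dict String (List (List String))) (hnd : d.keys.Nodup)
    (st sv : String) (al : Int) (hsv : sv ∈ d.keys) :
    (st, (sv, al)) ∈ pvPairs d
      ↔ ((al = 0 ∧ st ∈ pvEdges d sv 0) ∨ (al = 1 ∧ st ∈ pvEdges d sv 1)) := by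
  constructor
  · intro h
    unfold pvPairs at h
    rcases List.mem_flatMap.mp h with ⟨q, hq, hmem⟩
    have hval : d.getD q.1 [] = q.2 := PySem.Dict.getD_of_mem_items d (by exact hq) hnd []
    rcases List.mem_append.mp hmem with h' | h'
    · rcases List.mem_map.mp h' with ⟨e, he, heq⟩
      left
      obtain ⟨he1, he2⟩ := Prod.mk.injEq .. ▸ heq
      obtain ⟨hsv', hal⟩ := Prod.mk.injEq .. ▸ he2
      refine ⟨hal.symm, ?_⟩
      unfold pvEdges
      rw [← hsv', hval, ← he1]
      exact he
    · rcases List.mem_map.mp h' with ⟨e, he, heq⟩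
      right
      obtain ⟨he1, he2⟩ := Prod.mk.injEq .. ▸ heq
      obtain ⟨hsv', hal⟩ := Prod.mk.injEq .. ▸ he2
      refine ⟨hal.symm, ?_⟩
      unfold pvEdges
      rw [← hsv', hval, ← he1]
      exact he
  · intro h
    have hex : ∃ q ∈ d.items, q.1 = sv := by
      unfold PySem.Dict.keys at hsv
      rcases List.mem_map.mp hsv with ⟨q, hq, hq1⟩
      exact ⟨q, hq, hq1⟩
    rcases hex with ⟨q, hq, hq1⟩
    have hval : d.getD sv [] = q.2 := by
      subst hq1; exact PySem.Dict.getD_of_mem_items d hq hnd []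
    unfold pvPairs
    refine List.mem_flatMap.mpr ⟨q, hq, ?_⟩
    rcases h with ⟨hal, hst⟩ | ⟨hal, hst⟩
    · refine List.mem_append.mpr (Or.inl (List.mem_map.mpr ⟨st, ?_, by rw [hq1, hal]⟩))
      unfold pvEdges at hst; rw [hval] at hst; exact hst
    · refine List.mem_append.mpr (Or.inr (List.mem_map.mpr ⟨st, ?_, by rw [hq1, hal]⟩))
      unfold pvEdges at hst; rw [hval] at hst; exact hst

def pvHits (path : List String) (d : PySem.Dict String (List (List String))) :
    PySem.Set (String × Int) :=
  path.foldl (fun s step => PySem.Set.update s ((pvIndex d).getD step [])) PySem.Set.empty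

theorem pvB_hit_char (d : PySem.Dict String (List (List String))) (hnd : d.keys.Nodup)
    (path : List String) (sv : String) (hsv : sv ∈ d.keys) (al : Int) (hal : al = 0 ∨ al = 1) :
    (pvHits path d).contains (sv, al) = pvHit path (pvEdges d sv al) := by
  unfold pvHits
  rw [Bool.eq_iff_iff, PySem.Set.contains_iff, pvB_hits_mem]
  have hpairs : ∀ st, ((sv, al) ∈ (pvIndex d).getD st [] ↔ st ∈ pvEdges d sv al) := by
    intro st
    rw [pvB_getD]
    simp only [List.mem_map, List.mem_filter, beq_iff_eq]
    constructor
    · rintro ⟨q, ⟨hq, hq1⟩, hq2⟩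
      have hqeq : q = (st, (sv, al)) := by
        obtain ⟨e, pr⟩ := q; simp_all
      rw [hqeq] at hq
      rcases (pvB_pair_mem d hnd st sv al hsv).mp hq with ⟨h0, h⟩ | ⟨h1, h⟩
      · subst h0; exact h
      · subst h1; exact h
    · intro hst
      have hm : (st, (sv, al)) ∈ pvPairs d := by
        apply (pvB_pair_mem d hnd st sv al hsv).mpr
        rcases hal with rfl | rfl
        · exact Or.inl ⟨rfl, hst⟩
        · exact Or.inr ⟨rfl, hst⟩
      exact ⟨(st, (sv, al)), ⟨hm, rfl⟩, rfl⟩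
  simp only [hpairs]
  simp only [pvHit, List.any_eq_true, List.contains_iff_mem, PySem.Set.empty,
    List.not_mem_nil, false_or]
  constructor
  · rintro ⟨st, h1, h2⟩; exact ⟨st, h2, h1⟩
  · rintro ⟨st, h1, h2⟩; exact ⟨st, h2, h1⟩

theorem pvFlatMap_if {α β : Type} (c : α → Bool) (g : α → β) (l : List α) :
    l.flatMap (fun x => if c x then [g x] else []) = (l.filter c).map g := by
  induction l with
  | nil => rfl
  | cons x l ih => by_cases h : c x = true <;> simp [h, ih]

-- ===== VERDICT (by name: the statement is the Claim_ definition above) =====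
theorem find_sv_allele_spec : Claim_equal_find_sv_allele := by
  intro path raw _ _
  unfold Spec_find_sv_allele
  have hnd : (PySem.Dict.ofList raw).keys.Nodup := PySem.Dict.nodup_keys_ofList raw
  have hA : find_sv_allele path raw
      = ((PySem.Dict.ofList raw).keys).flatMap (pvContrib path (PySem.Dict.ofList raw)) := by
    unfold find_sv_allele
    exact (pvA_fold path (PySem.Dict.ofList raw) (PySem.Dict.ofList raw).keys PySem.Set.empty hnd
      (fun sv _ al h => by simp [PySem.Set.empty] at h)).trans (by simp [PySem.Set.empty])
  have hB : find_sv_allele_alt path raw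
      = ((PySem.Dict.ofList raw).keys.filter (fun sv =>
            ((pvHits path (PySem.Dict.ofList raw)).contains (sv, (0 : Int))
              != (pvHits path (PySem.Dict.ofList raw)).contains (sv, (1 : Int))))).map
          (fun sv => if (pvHits path (PySem.Dict.ofList raw)).contains (sv, (0 : Int))
            then (sv, (0 : Int)) else (sv, (1 : Int))) := by
    unfold find_sv_allele_alt
    simp only []
    rw [pvB_index_gen]
    exact (PySem.List.foldl_append_if _ _ _ []).trans (List.nil_append _)
  rw [hA, hB]
  rw [show (pvContrib path (PySem.Dict.ofList raw)) = (fun sv =>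
      if (pvHit path (pvEdges (PySem.Dict.ofList raw) sv 0)
          != pvHit path (pvEdges (PySem.Dict.ofList raw) sv 1))
      then [if pvHit path (pvEdges (PySem.Dict.ofList raw) sv 0)
            then (sv, (0 : Int)) else (sv, (1 : Int))] else []) from rfl]
  rw [pvFlatMap_if]
  have hcB : ∀ sv ∈ (PySem.Dict.ofList raw).keys,
      (pvHit path (pvEdges (PySem.Dict.ofList raw) sv 0)
        != pvHit path (pvEdges (PySem.Dict.ofList raw) sv 1))
      = ((pvHits path (PySem.Dict.ofList raw)).contains (sv, (0 : Int))
        != (pvHits path (PySem.Dict.ofList raw)).contains (sv, (1 : Int))) := by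
    intro sv hsv
    rw [pvB_hit_char (PySem.Dict.ofList raw) hnd path sv hsv 0 (Or.inl rfl),
      pvB_hit_char (PySem.Dict.ofList raw) hnd path sv hsv 1 (Or.inr rfl)]
  rw [List.filter_congr hcB]
  apply List.map_congr_left
  intro sv hsv
  rw [← pvB_hit_char (PySem.Dict.ofList raw) hnd path sv (List.mem_of_mem_filter hsv) 0 (Or.inl rfl)]
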